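-- pv_equiv track=rewrite | github.com/ProphetSunboy/python_tasks | concatenate_non_zero_digits_and_multiply_by_sum_I.py | sumAndMultiply
-- ===== SOURCE A (Python) =====
-- def sumAndMultiply(n: int) -> int:
--     """
--     Given an integer n, construct a new integer x by concatenating all
--     non-zero digits of n in their original order.
--     If there are no non-zero digits, then x = 0.
--
--     Let sum_x be the sum of digits in x.
--     Return the value of x * sum_x.
--
--     Args:
--         n (int): The input integer.
--
--     Returns:
--         int: The product of x and the sum of its digits.
--
--     Example:
--         Input: n = 102304
--         Non-zero digits: 1, 2, 3, 4 => x = 1234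
--         Sum of digits in x: 1 + 2 + 3 + 4 = 10
--         Output: 1234 * 10 = 12340
--
--         Input: n = 0
--         Output: 0
--
--     Time Complexity: O(k), where k is the number of digits in n.
--     Space Complexity: O(1).
--
--     LeetCode: Beats 100% of submissions
--     """
--     x_sum = 0
--     x = 0
--     curr_pow = 0
--
--     while n > 0:
--         d = n % 10
--         if d > 0:
--             x_sum += d
--             x += d * 10**curr_pow
--             curr_pow += 1
--
--         n //= 10
--
--     return x * x_sum
-- ===== SOURCE B (Python) =====
-- def sumAndMultiply(n: int) -> int:
--     if n <= 0:
--         return 0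
--     digits = [c for c in str(n) if c != '0']
--     x = 0
--     for c in digits:
--         x = x * 10 + (ord(c) - ord('0'))
--     return x * sum(ord(c) - ord('0') for c in digits)
-- ===== Notes on version B (the rewrite author's own statement) =====
-- stated objective: idiomatic
-- what changed: B works on the decimal string of n MSB-first (filter out '0' characters, fold the remaining digit characters into the value and their sum), instead of A's LSB-first arithmetic loop that accumulates with explicit powers of 10.
import Mathlib
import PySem

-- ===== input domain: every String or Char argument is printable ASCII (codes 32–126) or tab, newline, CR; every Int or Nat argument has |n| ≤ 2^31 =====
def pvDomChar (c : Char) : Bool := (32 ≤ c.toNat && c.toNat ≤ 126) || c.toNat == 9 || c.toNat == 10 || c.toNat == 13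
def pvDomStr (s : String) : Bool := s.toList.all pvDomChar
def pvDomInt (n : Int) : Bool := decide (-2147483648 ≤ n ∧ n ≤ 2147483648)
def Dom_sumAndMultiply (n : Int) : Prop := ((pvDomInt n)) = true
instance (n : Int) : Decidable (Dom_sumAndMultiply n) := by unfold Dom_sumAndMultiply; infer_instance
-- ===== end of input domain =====

-- B reads the decimal string of n MSB-first (filter '0' out, fold value and digit sum)
-- instead of A's LSB-first arithmetic loop with explicit powers of 10; objective: idiomatic.

-- ===== PORT A =====
-- A's while loop: state (x_sum, x, curr_pow), n halved by // 10 each step.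
def sumLoopA (n x_sum x : Int) (curr_pow : Nat) : Int :=
  if _h : 0 < n then
    let d := PySem.Int.mod n 10
    if 0 < d then
      sumLoopA (PySem.Int.floordiv n 10) (x_sum + d) (x + d * 10 ^ curr_pow) (curr_pow + 1)
    else
      sumLoopA (PySem.Int.floordiv n 10) x_sum x curr_pow
  else
    x * x_sum
termination_by n.toNat
decreasing_by
  all_goals
    have h10 : PySem.Int.floordiv n 10 = n / 10 := PySem.Int.floordiv_eq_ediv_of_pos (by omega)
    rw [h10]; omega

def sumAndMultiply (n : Int) : Int := sumLoopA n 0 0 0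

-- ===== PORT B =====
def sumAndMultiply_alt (n : Int) : Int :=
  if n ≤ 0 then 0
  else
    let digits := (PySem.Int.toChars n).filter (fun c => c ≠ '0')
    let x := digits.foldl (fun a c => a * 10 + ((c.toNat : Int) - 48)) 0
    x * digits.foldl (fun a c => a + ((c.toNat : Int) - 48)) 0

-- ===== PRECONDITION & SPEC =====
def Spec_sumAndMultiply (n : Int) (out : Int) : Prop := out = sumAndMultiply_alt n
instance (n : Int) (out : Int) : Decidable (Spec_sumAndMultiply n out) := by unfold Spec_sumAndMultiply; infer_instance

-- ===== CLAIM (what is proved, stated in full; the proofs are below) =====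
def Claim_equal_sumAndMultiply : Prop := ∀ (n : Int), Dom_sumAndMultiply n → Spec_sumAndMultiply n (sumAndMultiply n)

-- ===== LEMMAS AND PROOFS =====

-- value of the non-zero digits of m, concatenated in order (the mathematical common spec)
def Xv (m : Nat) : Int :=
  if m = 0 then 0
  else if m % 10 = 0 then Xv (m / 10) else Xv (m / 10) * 10 + (m % 10 : Int)
termination_by m
decreasing_by all_goals exact Nat.div_lt_self (by omega) (by omega)

-- sum of the non-zero digits of m
def Sv (m : Nat) : Int :=
  if m = 0 then 0 else Sv (m / 10) + (m % 10 : Int)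
termination_by m
decreasing_by exact Nat.div_lt_self (by omega) (by omega)

lemma Xv_eq (m : Nat) (hm : m ≠ 0) :
    Xv m = if m % 10 = 0 then Xv (m / 10) else Xv (m / 10) * 10 + (m % 10 : Int) := by
  rw [Xv, if_neg hm]

lemma Sv_eq (m : Nat) (hm : m ≠ 0) : Sv m = Sv (m / 10) + (m % 10 : Int) := by
  rw [Sv, if_neg hm]

lemma sumLoopA_spec (m : Nat) : ∀ (s x : Int) (p : Nat),
    sumLoopA (m : Int) s x p = (x + 10 ^ p * Xv m) * (s + Sv m) := by
  induction m using Nat.strong_induction_on with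
  | _ m ih =>
    intro s x p
    rcases Nat.eq_zero_or_pos m with hm | hm
    · subst hm
      rw [sumLoopA, Xv, Sv]
      simp
    · have hdiv : m / 10 < m := Nat.div_lt_self hm (by omega)
      rw [sumLoopA]
      have hpos : (0 : Int) < (m : Int) := by exact_mod_cast hm
      rw [dif_pos hpos]
      have hmod : PySem.Int.mod (m : Int) 10 = ((m % 10 : Nat) : Int) := by
        exact_mod_cast PySem.Int.mod_natCast m 10
      have hfd : PySem.Int.floordiv (m : Int) 10 = ((m / 10 : Nat) : Int) := by
        exact_mod_cast PySem.Int.floordiv_natCast m 10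
      simp only [hmod, hfd]
      by_cases hd : m % 10 = 0
      · rw [if_neg (by simp [hd]), ih _ hdiv, Xv_eq m (by omega), Sv_eq m (by omega),
          if_pos hd]
        have hz : (m : Int) % 10 = 0 := by omega
        rw [hz]
        ring
      · rw [if_pos (by exact_mod_cast Nat.pos_of_ne_zero hd), ih _ hdiv,
          Xv_eq m (by omega), Sv_eq m (by omega), if_neg hd]
        push_cast
        ring

-- toDigitsCore: the accumulator is only appended to
lemma toDigitsCore_acc (f : Nat) : ∀ (n : Nat) (acc : List Char),
    Nat.toDigitsCore 10 f n acc = Nat.toDigitsCore 10 f n [] ++ acc := by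
  induction f with
  | zero => intro n acc; simp [Nat.toDigitsCore]
  | succ f ih =>
    intro n acc
    simp only [Nat.toDigitsCore]
    by_cases h : n / 10 = 0
    · simp [h]
    · simp only [if_neg h]
      rw [ih (n / 10) ((n % 10).digitChar :: acc), ih (n / 10) [(n % 10).digitChar]]
      simp

-- toDigitsCore: the result does not depend on the fuel once it exceeds n
lemma toDigitsCore_fuel (n : Nat) : ∀ (f g : Nat), n < f → n < g →
    Nat.toDigitsCore 10 f n [] = Nat.toDigitsCore 10 g n [] := by
  induction n using Nat.strong_induction_on with
  | _ n ih =>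
    intro f g hf hg
    obtain ⟨f, rfl⟩ : ∃ f', f = f' + 1 := ⟨f - 1, by omega⟩
    obtain ⟨g, rfl⟩ : ∃ g', g = g' + 1 := ⟨g - 1, by omega⟩
    simp only [Nat.toDigitsCore]
    by_cases h : n / 10 = 0
    · simp [h]
    · simp only [if_neg h]
      have hlt : n / 10 < n := Nat.div_lt_self (by omega) (by omega)
      rw [toDigitsCore_acc f, toDigitsCore_acc g, ih _ hlt f g (by omega) (by omega)]

lemma toDigitsCore_succ (f n : Nat) :
    Nat.toDigitsCore 10 (f + 1) n [] =
      if n / 10 = 0 then [(n % 10).digitChar]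
      else Nat.toDigitsCore 10 f (n / 10) [] ++ [(n % 10).digitChar] := by
  rw [Nat.toDigitsCore.eq_2]
  by_cases h : n / 10 = 0
  · rw [if_pos h, if_pos h]
  · rw [if_neg h, if_neg h, toDigitsCore_acc f (n / 10)]

lemma toDigits_step (m : Nat) (hm : 10 ≤ m) :
    Nat.toDigits 10 m = Nat.toDigits 10 (m / 10) ++ [(m % 10).digitChar] := by
  have h : m / 10 ≠ 0 := by omega
  calc Nat.toDigits 10 m = Nat.toDigitsCore 10 (m + 1) m [] := rfl
    _ = Nat.toDigitsCore 10 m (m / 10) [] ++ [(m % 10).digitChar] := by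
        rw [toDigitsCore_succ, if_neg h]
    _ = Nat.toDigits 10 (m / 10) ++ [(m % 10).digitChar] := by
        rw [toDigitsCore_fuel (m / 10) m (m / 10 + 1)
          (by omega) (by omega)]
        rfl

lemma toDigits_small (m : Nat) (hm : m < 10) : Nat.toDigits 10 m = [m.digitChar] := by
  have h : m / 10 = 0 := by omega
  have h2 : m % 10 = m := by omega
  calc Nat.toDigits 10 m = Nat.toDigitsCore 10 (m + 1) m [] := rfl
    _ = [m.digitChar] := by rw [toDigitsCore_succ, if_pos h, h2]

lemma Xv_small (m : Nat) (h0 : 0 < m) (h : m < 10) : Xv m = (m : Int) := by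
  have hd0 : m / 10 = 0 := by omega
  rw [Xv_eq m (by omega), if_neg (show ¬ m % 10 = 0 by omega), hd0, Xv]
  simp
  omega

lemma Sv_small (m : Nat) (h0 : 0 < m) (h : m < 10) : Sv m = (m : Int) := by
  have hd0 : m / 10 = 0 := by omega
  rw [Sv_eq m (by omega), hd0, Sv]
  simp
  omega

-- the non-'0' digit characters of m fold to (Xv m, Sv m)
lemma fold_digits (m : Nat) (hm : 0 < m) :
    ((Nat.toDigits 10 m).filter (fun c => c ≠ '0')).foldl
        (fun a c => a * 10 + ((c.toNat : Int) - 48)) 0 = Xv m ∧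
    ((Nat.toDigits 10 m).filter (fun c => c ≠ '0')).foldl
        (fun a c => a + ((c.toNat : Int) - 48)) 0 = Sv m := by
  induction m using Nat.strong_induction_on with
  | _ m ih =>
    by_cases hsm : m < 10
    · rw [toDigits_small m hsm]
      rw [Xv_small m hm hsm, Sv_small m hm hsm]
      interval_cases m
      all_goals decide
    · have hm10 : 10 ≤ m := by omega
      have hlt : m / 10 < m := Nat.div_lt_self (by omega) (by omega)
      have hpos : 0 < m / 10 := by omega
      obtain ⟨ihx, ihs⟩ := ih _ hlt hpos
      rw [toDigits_step m hm10, List.filter_append, List.foldl_append, List.foldl_append,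
        ihx, ihs, Xv_eq m (by omega), Sv_eq m (by omega)]
      by_cases hd0 : m % 10 = 0
      · rw [if_pos hd0, hd0]
        norm_num [Nat.digitChar]
        omega
      · rw [if_neg hd0]
        have hd10 : m % 10 < 10 := Nat.mod_lt _ (by omega)
        have hd1 : 0 < m % 10 := by omega
        interval_cases hd : (m % 10)
        all_goals (constructor <;> simp [List.filter, Nat.digitChar] <;> omega)

-- ===== VERDICT (by name: the statement is the Claim_ definition above) =====
theorem sumAndMultiply_spec : Claim_equal_sumAndMultiply := by
  intro n _hdom
  unfold Spec_sumAndMultiply sumAndMultiply sumAndMultiply_alt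
  by_cases hn : n ≤ 0
  · rw [if_pos hn, sumLoopA, dif_neg (by omega)]
    simp
  · rw [if_neg hn]
    have htc : PySem.Int.toChars n = Nat.toDigits 10 n.toNat := by
      rw [PySem.Int.toChars, if_neg (by omega)]
    obtain ⟨hx, hs⟩ := fold_digits n.toNat (by omega)
    have hcast : ((n.toNat : Nat) : Int) = n := by omega
    simp only [htc, hx, hs]
    calc sumLoopA n 0 0 0 = sumLoopA ((n.toNat : Nat) : Int) 0 0 0 := by rw [hcast]
      _ = (0 + 10 ^ 0 * Xv n.toNat) * (0 + Sv n.toNat) := sumLoopA_spec n.toNat 0 0 0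
      _ = Xv n.toNat * Sv n.toNat := by ring
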